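-- pv_equiv track=rewrite | github.com/lamnguyen5464/8-Queens-by-SAT | src/main.py | cal_result_cnf
-- ===== SOURCE A (Python) =====
-- import copy
--
-- def cal_result_cnf(cnf=[], queens=[]):
--     res = []
--     for clause in cnf:
--         sat_for_cnf = []
--         for literal in clause:
--             if abs(literal) in queens:
--                 sat_for_cnf.append(not (literal < 0))
--             else:
--                 sat_for_cnf.append(literal < 0)
--
--         res.append(sat_for_cnf)
--     ans = []
--     for item in res:
--         if True in item:
--             ans.append(True)
--         else:
--             ans.append(False)
--
--     return copy.deepcopy(ans)
-- ===== SOURCE B (Python) =====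
-- def cal_result_cnf(cnf=[], queens=[]):
--     qset = set(queens)
--     ans = []
--     for clause in cnf:
--         pos = {l for l in clause if l >= 0}
--         neg = {-l for l in clause if l < 0}
--         ans.append(bool(pos & qset) or not neg <= qset)
--     return ans
-- ===== Notes on version B (the rewrite author's own statement) =====
-- stated objective: alternative
-- what changed: Replaces A's per-literal (membership XOR sign) boolean matrix plus True-membership scan with a set-algebra formulation: each clause is split into a positive-variable set and a negated-variable set, and satisfiability is decided by one intersection test (some positive variable is a queen) and one subset test (some negated variable is not a queen) against the queen set.
import Mathlib
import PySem

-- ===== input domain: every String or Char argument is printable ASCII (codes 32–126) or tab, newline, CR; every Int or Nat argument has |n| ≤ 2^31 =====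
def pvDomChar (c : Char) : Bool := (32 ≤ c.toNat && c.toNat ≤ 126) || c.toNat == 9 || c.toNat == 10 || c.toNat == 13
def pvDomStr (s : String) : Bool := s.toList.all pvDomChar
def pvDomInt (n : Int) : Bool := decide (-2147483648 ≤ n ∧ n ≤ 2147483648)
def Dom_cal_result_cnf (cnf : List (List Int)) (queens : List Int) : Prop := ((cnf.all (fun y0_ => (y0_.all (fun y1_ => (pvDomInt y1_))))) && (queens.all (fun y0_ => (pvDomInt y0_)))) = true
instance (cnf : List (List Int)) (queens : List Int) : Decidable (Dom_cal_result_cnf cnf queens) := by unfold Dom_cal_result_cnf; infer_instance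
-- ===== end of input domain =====

-- B recasts A by set algebra: each clause is split into a positive-variable set and a
-- negated-variable set, and satisfiability is an intersection/subset test against the
-- queen set, instead of A's per-literal boolean matrix plus True-membership scan.


-- ===== PORT A =====
-- literal transliteration of A: build the per-literal boolean matrix `res`,
-- then map each row to (True in row); copy.deepcopy on a list of bools = identity
def cal_result_cnf (cnf : List (List Int)) (queens : List Int) : List Bool :=
  let res : List (List Bool) := cnf.foldl (fun res clause =>
    res ++ [clause.foldl (fun sat_for_cnf literal =>
      sat_for_cnf ++ [if queens.contains |literal| then !(decide (literal < 0)) else decide (literal < 0)]) []]) []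
  res.foldl (fun ans item => ans ++ [if item.contains true then true else false]) []

-- ===== PORT B =====
-- transliteration of Source B: qset = set(queens); per clause, pos/neg set comprehensions,
-- then bool(pos & qset) or not (neg <= qset)
def cal_result_cnf_alt (cnf : List (List Int)) (queens : List Int) : List Bool :=
  let qset : PySem.Set Int := PySem.Set.ofList queens
  cnf.foldl (fun ans clause =>
    let pos : PySem.Set Int := PySem.Set.ofList (clause.filter (fun l => decide (0 ≤ l)))
    let neg : PySem.Set Int := PySem.Set.ofList ((clause.filter (fun l => decide (l < 0))).map (fun l => -l))
    ans ++ [(!(PySem.Set.inter pos qset).isEmpty) || !(PySem.Set.issubset neg qset)]) []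

-- ===== PRECONDITION & SPEC =====
def Spec_cal_result_cnf (cnf : List (List Int)) (queens : List Int) (out : List Bool) : Prop := out = cal_result_cnf_alt cnf queens
instance (cnf : List (List Int)) (queens : List Int) (out : List Bool) : Decidable (Spec_cal_result_cnf cnf queens out) := by unfold Spec_cal_result_cnf; infer_instance

-- ===== CLAIM =====
def Claim_equal_cal_result_cnf : Prop := ∀ (cnf : List (List Int)) (queens : List Int), Dom_cal_result_cnf cnf queens → Spec_cal_result_cnf cnf queens (cal_result_cnf cnf queens)

-- ===== LEMMAS AND PROOFS =====

-- an append-accumulator foldl is init ++ map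
theorem pv_foldl_app {α β : Type} (f : α → β) (xs : List α) (init : List β) :
    xs.foldl (fun acc x => acc ++ [f x]) init = init ++ xs.map f := by
  induction xs generalizing init with
  | nil => simp
  | cons x xs ih => simp [List.foldl, ih]

-- per clause: "True in A's row" = B's set-algebra test
theorem pv_clause (queens : List Int) (clause : List Int) :
    (if (clause.map (fun l => if queens.contains |l| then !(decide (l < 0)) else decide (l < 0))).contains true then true else false)
      = ((!(PySem.Set.inter (PySem.Set.ofList (clause.filter (fun l => decide (0 ≤ l)))) (PySem.Set.ofList queens)).isEmpty)
          || !(PySem.Set.issubset (PySem.Set.ofList ((clause.filter (fun l => decide (l < 0))).map (fun l => -l))) (PySem.Set.ofList queens))) := by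
  rw [Bool.eq_iff_iff]
  simp only [Bool.if_true_left, Bool.or_eq_true, Bool.not_eq_true', Bool.eq_false_iff, ne_eq,
    List.contains_eq_mem, decide_eq_true_eq, List.mem_map, List.mem_filter,
    List.isEmpty_iff, List.eq_nil_iff_forall_not_mem,
    PySem.Set.mem_inter, PySem.Set.mem_ofList, PySem.Set.issubset_iff,
    not_forall, not_not, Bool.false_eq_true, or_false]
  constructor
  · rintro ⟨a, ha, hif⟩
    by_cases hq : |a| ∈ queens
    · simp only [hq, if_pos, Bool.not_eq_true', decide_eq_false_iff_not, not_lt] at hif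
      exact Or.inl ⟨a, ⟨⟨ha, hif⟩, by rwa [abs_of_nonneg hif] at hq⟩⟩
    · simp only [hq, if_neg, not_false_iff, decide_eq_true_eq] at hif
      exact Or.inr ⟨-a, ⟨⟨a, ⟨ha, hif⟩, rfl⟩, by rwa [abs_of_neg hif] at hq⟩⟩
  · rintro (⟨x, ⟨hx, h0⟩, hq⟩ | ⟨x, ⟨a, ⟨ha, hneg⟩, rfl⟩, hq⟩)
    · refine ⟨x, hx, ?_⟩
      rw [abs_of_nonneg h0] at *
      simp [hq, not_lt.mpr h0]
    · refine ⟨a, ha, ?_⟩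
      rw [abs_of_neg hneg]
      simp [hq, hneg]

-- ===== VERDICT =====
theorem cal_result_cnf_spec : Claim_equal_cal_result_cnf := by
  intro cnf queens _
  unfold Spec_cal_result_cnf cal_result_cnf cal_result_cnf_alt
  simp only [pv_foldl_app, List.nil_append, List.map_map]
  exact List.map_congr_left (fun clause _ => pv_clause queens clause)
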